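-- pv_equiv track=rewrite | github.com/viralemergence/tatat | src/app/ncrna/assign_gene_annotations_to_ncrna.py | assign_best_gene_to_ncrna_ids
-- ===== SOURCE A (Python) =====
-- def assign_best_gene_to_ncrna_ids(accession_numbers_gene_mapping: dict[str],
--                            ncrna_id_accession_numbers_mapping: dict[list[str]]) -> dict[dict[str]]:
--
--     ncrna_id_best_gene_mapping = {}
--
--     for ncrna_id, accession_numbers in ncrna_id_accession_numbers_mapping.items():
--         first_hit = None
--         gene_hit = None
--         for accession_number in accession_numbers:
--             try:
--                 gene = accession_numbers_gene_mapping[accession_number]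
--             except KeyError:
--                 continue
--
--             if first_hit is None:
--                 first_hit = {"accession": accession_number, "gene": gene}
--
--             if gene.startswith("LOC"):
--                 continue
--             else:
--                 gene_hit = {"accession": accession_number, "gene": gene}
--                 break
--
--         if first_hit is None and gene_hit is None:
--             continue
--         elif first_hit and gene_hit is None:
--             best_hit = first_hit
--         elif first_hit and gene_hit:
--             best_hit = gene_hit
--
--         ncrna_id_best_gene_mapping[ncrna_id] = best_hit
--
--     return ncrna_id_best_gene_mapping
-- ===== SOURCE B (Python) =====
-- def assign_best_gene_to_ncrna_ids(accession_numbers_gene_mapping: dict[str],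
--                            ncrna_id_accession_numbers_mapping: dict[list[str]]) -> dict[dict[str]]:
--     # Filter-then-select: collect all (accession, gene) pairs with a known gene,
--     # then pick the first non-"LOC" hit, falling back to the first valid pair.
--     ncrna_id_best_gene_mapping = {}
--     for ncrna_id, accession_numbers in ncrna_id_accession_numbers_mapping.items():
--         valid = [(a, accession_numbers_gene_mapping[a])
--                  for a in accession_numbers if a in accession_numbers_gene_mapping]
--         gene_hit = next((p for p in valid if not p[1].startswith("LOC")), None)
--         if valid:
--             accession, gene = gene_hit if gene_hit is not None else valid[0]
--             ncrna_id_best_gene_mapping[ncrna_id] = {"accession": accession, "gene": gene}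
--     return ncrna_id_best_gene_mapping
-- ===== Notes on version B (the rewrite author's own statement) =====
-- stated objective: simpler
-- what changed: Replaces A's interleaved scan with break and first_hit/gene_hit state plus a three-way if-chain by a filter-then-select decomposition: build the list of valid (accession, gene) pairs, take the first non-LOC one via next(), else the first valid pair.
import Mathlib
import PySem

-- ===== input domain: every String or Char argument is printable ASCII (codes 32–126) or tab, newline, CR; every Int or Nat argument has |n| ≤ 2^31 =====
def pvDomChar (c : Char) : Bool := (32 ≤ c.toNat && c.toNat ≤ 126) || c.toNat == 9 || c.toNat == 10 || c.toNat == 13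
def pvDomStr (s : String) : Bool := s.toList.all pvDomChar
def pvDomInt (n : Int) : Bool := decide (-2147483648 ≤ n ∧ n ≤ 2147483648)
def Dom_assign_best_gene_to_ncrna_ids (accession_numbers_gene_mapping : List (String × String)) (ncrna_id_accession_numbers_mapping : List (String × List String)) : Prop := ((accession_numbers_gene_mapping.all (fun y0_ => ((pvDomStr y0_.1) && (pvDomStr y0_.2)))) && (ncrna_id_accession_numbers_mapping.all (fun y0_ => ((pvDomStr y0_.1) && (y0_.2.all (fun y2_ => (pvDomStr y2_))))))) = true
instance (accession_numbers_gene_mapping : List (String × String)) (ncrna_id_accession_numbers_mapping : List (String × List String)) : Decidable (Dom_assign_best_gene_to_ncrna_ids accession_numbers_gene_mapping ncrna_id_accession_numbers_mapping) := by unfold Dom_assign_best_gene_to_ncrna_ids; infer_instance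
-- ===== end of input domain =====

-- B replaces A's interleaved scan-with-break and first_hit/gene_hit state by a filter-then-select
-- decomposition (valid pairs, then first non-LOC hit, else first valid pair); objective: simpler.


-- ===== PORT A =====
def pvLoopA (m : PySem.Dict String String) : List String → Option (List (String × String)) → Option (List (String × String)) × Option (List (String × String))
  | [], first_hit => (first_hit, none)
  | accession_number :: rest, first_hit =>
    match m.get? accession_number with
    | none => pvLoopA m rest first_hit          -- except KeyError: continue
    | some gene =>
      let first_hit := if first_hit.isNone then some [("accession", accession_number), ("gene", gene)] else first_hit
      if PySem.Str.startswith gene "LOC" then pvLoopA m rest first_hit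
      else (first_hit, some [("accession", accession_number), ("gene", gene)])   -- break

def assign_best_gene_to_ncrna_ids (accession_numbers_gene_mapping : List (String × String)) (ncrna_id_accession_numbers_mapping : List (String × List String)) : List (String × List (String × String)) :=
  let m := PySem.Dict.mk accession_numbers_gene_mapping
  (ncrna_id_accession_numbers_mapping.foldl (fun acc p =>
      match pvLoopA m p.2 none with
      | (none, none) => acc
      | (some first_hit, none) => acc.insert p.1 first_hit
      | (_, some gene_hit) => acc.insert p.1 gene_hit)
    (PySem.Dict.empty)).items

-- ===== PORT B =====
def assign_best_gene_to_ncrna_ids_alt (accession_numbers_gene_mapping : List (String × String)) (ncrna_id_accession_numbers_mapping : List (String × List String)) : List (String × List (String × String)) :=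
  let m := PySem.Dict.mk accession_numbers_gene_mapping
  (ncrna_id_accession_numbers_mapping.foldl (fun acc p =>
      let valid := p.2.filterMap (fun a => (m.get? a).map (fun g => (a, g)))
      let gene_hit := valid.find? (fun q => !(PySem.Str.startswith q.2 "LOC"))
      match gene_hit.orElse (fun _ => valid.head?) with
      | none => acc
      | some (accession, gene) => acc.insert p.1 [("accession", accession), ("gene", gene)])
    (PySem.Dict.empty)).items

-- ===== PRECONDITION & SPEC =====
def Spec_assign_best_gene_to_ncrna_ids (accession_numbers_gene_mapping : List (String × String)) (ncrna_id_accession_numbers_mapping : List (String × List String)) (out : List (String × List (String × String))) : Prop := out = assign_best_gene_to_ncrna_ids_alt accession_numbers_gene_mapping ncrna_id_accession_numbers_mapping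
instance (accession_numbers_gene_mapping : List (String × String)) (ncrna_id_accession_numbers_mapping : List (String × List String)) (out : List (String × List (String × String))) : Decidable (Spec_assign_best_gene_to_ncrna_ids accession_numbers_gene_mapping ncrna_id_accession_numbers_mapping out) := by unfold Spec_assign_best_gene_to_ncrna_ids; infer_instance

-- ===== CLAIM (what is proved, stated in full; the proofs are below) =====
def Claim_equal_assign_best_gene_to_ncrna_ids : Prop := ∀ (accession_numbers_gene_mapping : List (String × String)) (ncrna_id_accession_numbers_mapping : List (String × List String)), Dom_assign_best_gene_to_ncrna_ids accession_numbers_gene_mapping ncrna_id_accession_numbers_mapping → Spec_assign_best_gene_to_ncrna_ids accession_numbers_gene_mapping ncrna_id_accession_numbers_mapping (assign_best_gene_to_ncrna_ids accession_numbers_gene_mapping ncrna_id_accession_numbers_mapping)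

-- ===== LEMMAS AND PROOFS =====

-- proof-only helpers: the two-entry dict, the valid-pairs list, the non-LOC test
def pvMk (q : String × String) : List (String × String) := [("accession", q.1), ("gene", q.2)]
def pvValid (m : PySem.Dict String String) (accs : List String) : List (String × String) :=
  accs.filterMap (fun a => (m.get? a).map (fun g => (a, g)))
def pvPred (q : String × String) : Bool := !(PySem.Str.startswith q.2 "LOC")

-- A's interleaved scan-with-break equals B's filter-then-select, for any pending first_hit.
lemma pvLoop_eq (m : PySem.Dict String String) (accs : List String) :
    ∀ (first : Option (List (String × String))),
    (match pvLoopA m accs first with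
     | (none, none) => none
     | (some f, none) => some f
     | (_, some g) => some g)
    = (match (pvValid m accs).find? pvPred, first with
       | some q, _ => some (pvMk q)
       | none, some f => some f
       | none, none => (pvValid m accs).head?.map pvMk) := by
  induction accs with
  | nil => intro first; cases first <;> simp [pvLoopA, pvValid]
  | cons a rest ih =>
    intro first
    cases hm : m.get? a with
    | none =>
      have hv : pvValid m (a :: rest) = pvValid m rest := by
        simp [pvValid, hm]
      rw [hv]; rw [show pvLoopA m (a :: rest) first = pvLoopA m rest first by
        simp [pvLoopA, hm]]
      exact ih first
    | some gene =>
      have hv : pvValid m (a :: rest) = (a, gene) :: pvValid m rest := by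
        simp [pvValid, hm]
      rw [hv]
      by_cases hs : PySem.Chars.startswith gene.toList ['L', 'O', 'C'] = true
      · have hp : pvPred (a, gene) = false := by simp [pvPred, PySem.Str.startswith, hs]
        rw [List.find?_cons, hp]
        cases first with
        | none =>
          rw [show pvLoopA m (a :: rest) none
                = pvLoopA m rest (some [("accession", a), ("gene", gene)]) by
              simp [pvLoopA, hm, PySem.Str.startswith, hs]]
          rw [ih (some [("accession", a), ("gene", gene)])]
          cases hf : (pvValid m rest).find? pvPred <;> simp [pvMk]
        | some f =>
          rw [show pvLoopA m (a :: rest) (some f) = pvLoopA m rest (some f) by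
              simp [pvLoopA, hm, PySem.Str.startswith, hs]]
          rw [ih (some f)]
          cases hf : (pvValid m rest).find? pvPred <;> simp
      · have hp : pvPred (a, gene) = true := by simp [pvPred, PySem.Str.startswith, hs]
        rw [List.find?_cons, hp]
        cases first <;>
          simp [pvLoopA, hm, PySem.Str.startswith, hs, pvMk]

-- the per-ncrna_id step of A's outer loop equals the per-ncrna_id step of B's outer loop
lemma pv_item_eq (m : PySem.Dict String String)
    (acc : PySem.Dict String (List (String × String))) (p : String × List String) :
    (match pvLoopA m p.2 none with
     | (none, none) => acc
     | (some first_hit, none) => acc.insert p.1 first_hit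
     | (_, some gene_hit) => acc.insert p.1 gene_hit)
    = (match ((pvValid m p.2).find? pvPred).orElse (fun _ => (pvValid m p.2).head?) with
       | none => acc
       | some (accession, gene) => acc.insert p.1 [("accession", accession), ("gene", gene)]) := by
  have h := pvLoop_eq m p.2 none
  rcases hl : pvLoopA m p.2 none with ⟨f, g⟩
  rw [hl] at h
  cases g with
  | some gv =>
    cases hf : (pvValid m p.2).find? pvPred with
    | some q =>
      rw [hf] at h
      cases f <;>
        · simp only [Option.some.injEq] at h
          simp [Option.orElse, h, pvMk]
    | none =>
      rw [hf] at h
      cases hh : (pvValid m p.2).head? with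
      | none => rw [hh] at h; cases f <;> simp at h
      | some q =>
        rw [hh] at h
        cases f <;>
          · simp only [Option.map_some, Option.some.injEq] at h
            simp [Option.orElse, h, pvMk]
  | none =>
    cases f with
    | none =>
      cases hf : (pvValid m p.2).find? pvPred with
      | some q => rw [hf] at h; simp at h
      | none =>
        rw [hf] at h
        cases hh : (pvValid m p.2).head? with
        | some q => rw [hh] at h; simp at h
        | none => simp [Option.orElse]
    | some fv =>
      cases hf : (pvValid m p.2).find? pvPred with
      | some q =>
        rw [hf] at h
        simp only [Option.some.injEq] at h
        simp [Option.orElse, h, pvMk]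
      | none =>
        rw [hf] at h
        cases hh : (pvValid m p.2).head? with
        | none => rw [hh] at h; simp at h
        | some q =>
          rw [hh] at h
          simp only [Option.map_some, Option.some.injEq] at h
          simp [Option.orElse, h, pvMk]

-- ===== VERDICT (by name: the statement is the Claim_ definition above) =====
theorem assign_best_gene_to_ncrna_ids_spec : Claim_equal_assign_best_gene_to_ncrna_ids := by
  intro m nm _
  unfold Spec_assign_best_gene_to_ncrna_ids assign_best_gene_to_ncrna_ids assign_best_gene_to_ncrna_ids_alt
  dsimp only
  congr 1
  apply PySem.List.foldl_congr_mem
  intro acc p _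
  exact pv_item_eq (PySem.Dict.mk m) acc p
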